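-- pv_equiv track=rewrite | github.com/BelentPatrus/DjangoChess | mysite/chessengine/engine/chessboard.py | __convert2D__
-- ===== SOURCE A (Python) =====
-- def __convert2D__(board):
--     result = []
--     row = 8
--     index = 0
--     while index < len(board):
--         result.append(board[index:index+row])
--         index = index + row
--     return result
-- ===== SOURCE B (Python) =====
-- def __convert2D__(board):
--     result = []
--     buf = []
--     for x in board:
--         buf.append(x)
--         if len(buf) == 8:
--             result.append(buf)
--             buf = []
--     if buf:
--         result.append(buf)
--     return result
-- ===== Notes on version B (the rewrite author's own statement) =====
-- stated objective: alternative
-- what changed: Replaces index-based slicing (board[index:index+8] in a while loop) by a single element-wise pass maintaining a current-row buffer flushed at length 8, with a final flush for a partial last row.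
import Mathlib
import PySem

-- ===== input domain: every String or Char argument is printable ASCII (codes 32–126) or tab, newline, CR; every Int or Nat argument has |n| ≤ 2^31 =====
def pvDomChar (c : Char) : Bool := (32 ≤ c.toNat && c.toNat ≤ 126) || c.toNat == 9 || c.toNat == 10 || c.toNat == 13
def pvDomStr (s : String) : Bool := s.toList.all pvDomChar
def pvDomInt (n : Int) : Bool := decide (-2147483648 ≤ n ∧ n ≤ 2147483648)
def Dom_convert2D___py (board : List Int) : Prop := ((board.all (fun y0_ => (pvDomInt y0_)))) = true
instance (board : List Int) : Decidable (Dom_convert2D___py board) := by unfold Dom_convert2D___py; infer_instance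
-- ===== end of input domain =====

-- B iterates element by element with a current-row buffer instead of A's index slicing; alternative decomposition, same cost.

-- ===== PORT A =====
-- while index < len(board): result.append(board[index:index+8]); index += 8
def pvALoop (board : List Int) (index : Nat) : List (List Int) :=
  if _h : index < board.length then
    PySem.List.slice board (some (index : Int)) (some ((index : Int) + 8)) :: pvALoop board (index + 8)
  else []
termination_by board.length - index

def convert2D___py (board : List Int) : List (List Int) := pvALoop board 0

-- ===== PORT B =====
-- single pass: buf.append(x); flush when len(buf) == 8; final flush of a non-empty buf
def pvBLoop : List Int → List Int → List (List Int)
  | [], buf => if buf = [] then [] else [buf]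
  | x :: xs, buf =>
    let buf' := buf ++ [x]
    if buf'.length = 8 then buf' :: pvBLoop xs [] else pvBLoop xs buf'

def convert2D___py_alt (board : List Int) : List (List Int) := pvBLoop board []

-- ===== PRECONDITION & SPEC =====
def Spec_convert2D___py (board : List Int) (out : List (List Int)) : Prop := out = convert2D___py_alt board
instance (board : List Int) (out : List (List Int)) : Decidable (Spec_convert2D___py board out) := by unfold Spec_convert2D___py; infer_instance

-- ===== CLAIM (what is proved, stated in full; the proofs are below) =====
def Claim_equal_convert2D___py : Prop := ∀ (board : List Int), Dom_convert2D___py board → Spec_convert2D___py board (convert2D___py board)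

-- ===== LEMMAS AND PROOFS =====

-- proof-side normal form: chunks of 8 by take/drop
def pvChunks8 : List Int → List (List Int)
  | [] => []
  | x :: xs => ((x :: xs).take 8) :: pvChunks8 (xs.drop 7)
termination_by xs => xs.length
decreasing_by simp

theorem pvChunks8_cons (x : Int) (xs : List Int) :
    pvChunks8 (x :: xs) = (x :: xs).take 8 :: pvChunks8 ((x :: xs).drop 8) := by
  rw [pvChunks8.eq_2]
  simp

theorem pvChunks8_nil : pvChunks8 [] = [] := by rw [pvChunks8.eq_1]

theorem pvBLoop_eq_chunks8 (xs : List Int) (buf : List Int) (h : buf.length < 8) :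
    pvBLoop xs buf = pvChunks8 (buf ++ xs) := by
  induction xs generalizing buf with
  | nil =>
    simp only [pvBLoop, List.append_nil]
    by_cases hb : buf = []
    · simp [hb, pvChunks8_nil]
    · obtain ⟨y, ys, rfl⟩ := List.exists_cons_of_ne_nil hb
      simp only [if_neg hb, pvChunks8_cons]
      have h7 : ys.length < 7 := by simp at h; omega
      rw [List.take_of_length_le (by simp; omega), List.drop_of_length_le (by simp; omega)]
      simp [pvChunks8_nil]
  | cons x xs ih =>
    simp only [pvBLoop]
    have hassoc : buf ++ x :: xs = (buf ++ [x]) ++ xs := by simp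
    by_cases h8 : (buf ++ [x]).length = 8
    · simp only [if_pos h8]
      rw [ih [] (by simp), hassoc]
      obtain ⟨y, ys, hys⟩ : ∃ y ys, buf ++ [x] = y :: ys := by
        cases hb : buf ++ [x] with
        | nil => simp at hb
        | cons y ys => exact ⟨y, ys, rfl⟩
      rw [hys, List.cons_append, pvChunks8_cons, ← List.cons_append, ← hys]
      rw [List.take_append_of_le_length (by omega), List.take_of_length_le (by omega),
          List.drop_append_of_le_length (by omega), List.drop_of_length_le (by omega)]
    · simp only [if_neg h8]
      rw [ih (buf ++ [x]) (by simp at h8 ⊢; omega), hassoc]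

theorem pvALoop_eq_chunks8 (board : List Int) (i : Nat) :
    pvALoop board i = pvChunks8 (board.drop i) := by
  rw [pvALoop]
  by_cases h : i < board.length
  · rw [dif_pos h]
    have hs : PySem.List.slice board (some (i : Int)) (some ((i : Int) + 8)) =
        (board.drop i).take 8 := by
      have := PySem.List.slice_natCast_add board i 8
      simpa using this
    rw [hs]
    cases hd : board.drop i with
    | nil => exfalso; have := List.length_drop (l := board) (i := i); rw [hd] at this; simp at this; omega
    | cons y ys =>
      rw [pvChunks8_cons, ← hd]
      have : board.drop (i + 8) = (board.drop i).drop 8 := by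
        rw [List.drop_drop]
      rw [pvALoop_eq_chunks8 board (i + 8), this]
  · rw [dif_neg h]
    rw [List.drop_of_length_le (by omega), pvChunks8_nil]
termination_by board.length - i

-- ===== VERDICT (by name: the statement is the Claim_ definition above) =====
theorem convert2D___py_spec : Claim_equal_convert2D___py := by
  intro board _
  unfold Spec_convert2D___py convert2D___py convert2D___py_alt
  rw [pvALoop_eq_chunks8, pvBLoop_eq_chunks8 board [] (by simp)]
  simp
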